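-- pv_equiv track=rewrite | github.com/cosmos/example | scripts/docs-sync/transform.py | extract_h1
-- ===== SOURCE A (Python) =====
-- def extract_h1(content: str) -> tuple[str | None, str]:
--     """Remove the first # H1 line. Returns (title, remaining content)."""
--     lines = content.split("\n")
--     for i, line in enumerate(lines):
--         if line.startswith("# "):
--             title = line[2:].strip()
--             remaining = "\n".join(lines[i + 1:]).lstrip("\n")
--             return title, remaining
--     return None, content
-- ===== SOURCE B (Python) =====
-- def extract_h1(content: str) -> tuple[str | None, str]:
--     """Remove the first # H1 line. Returns (title, remaining content)."""
--     s = content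
--     while True:
--         line, sep, rest = s.partition("\n")
--         if line.startswith("# "):
--             return line[2:].strip(), rest.lstrip("\n")
--         if not sep:
--             return None, content
--         s = rest
-- ===== Notes on version B (the rewrite author's own statement) =====
-- stated objective: simpler
-- what changed: B replaces A's split-into-a-line-list with an enumerate loop and a join of the suffix line list by a single while loop over str.partition at the first newline, keeping only the yet-unscanned tail: no line list is ever built and nothing is joined.
import Mathlib
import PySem

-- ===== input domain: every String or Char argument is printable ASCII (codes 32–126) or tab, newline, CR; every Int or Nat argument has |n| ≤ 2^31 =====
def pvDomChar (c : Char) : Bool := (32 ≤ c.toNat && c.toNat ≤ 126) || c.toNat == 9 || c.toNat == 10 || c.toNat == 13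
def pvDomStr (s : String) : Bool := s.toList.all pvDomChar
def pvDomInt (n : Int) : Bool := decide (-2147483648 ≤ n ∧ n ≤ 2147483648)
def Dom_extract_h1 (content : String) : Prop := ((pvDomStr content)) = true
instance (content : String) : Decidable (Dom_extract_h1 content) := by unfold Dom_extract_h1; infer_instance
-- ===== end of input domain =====

-- B replaces A's split-into-a-line-list / index-loop / join-of-the-suffix with a single
-- partition("\n") loop that never materialises a line list: simpler, no join. (objective: simpler)

-- ===== PORT A =====
-- A's 'for i, line in enumerate(lines)' with early return; the recursion's tail IS lines[i+1:].
-- '.lstrip("\n")' is ported by hand as dropWhile (· = '\n') — exact: it drops exactly the leading '\n' characters.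
def extract_h1_loop : List (List Char) → Option (List Char × List Char)
  | [] => none
  | line :: rest =>
    if PySem.Chars.startswith line ['#', ' '] then
      some (PySem.Chars.strip (PySem.List.slice line (some 2) none),
            (PySem.Chars.join ['\n'] rest).dropWhile (fun c => c = '\n'))
    else extract_h1_loop rest

def extract_h1 (content : String) : Option String × String :=
  match extract_h1_loop (PySem.Chars.splitOn content.toList ['\n']) with
  | some (t, r) => (some (String.ofList t), String.ofList r)
  | none => (none, content)

-- ===== PORT B =====
-- Source B's while-loop over s.partition("\n"); partition at the single-char separator "\n" is ported
-- by hand as (takeWhile (· ≠ '\n'), dropWhile (· ≠ '\n')) — exact: split at the FIRST '\n';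
-- '.lstrip("\n")' as dropWhile (· = '\n') — exact as above.
def extract_h1_alt_loop (s : List Char) : Option (List Char × List Char) :=
  if PySem.Chars.startswith (s.takeWhile (fun c => c ≠ '\n')) ['#', ' '] then
    some (PySem.Chars.strip (PySem.List.slice (s.takeWhile (fun c => c ≠ '\n')) (some 2) none),
          (s.dropWhile (fun c => c ≠ '\n')).tail.dropWhile (fun c => c = '\n'))
  else
    match h : s.dropWhile (fun c => c ≠ '\n') with
    | [] => none
    | _ :: rest => extract_h1_alt_loop rest
termination_by s.length
decreasing_by
  have h1 : (s.dropWhile (fun c => c ≠ '\n')).length ≤ s.length :=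
    List.Sublist.length_le (List.dropWhile_sublist _)
  rw [h] at h1
  simp at h1
  omega

def extract_h1_alt (content : String) : Option String × String :=
  match extract_h1_alt_loop content.toList with
  | some (t, r) => (some (String.ofList t), String.ofList r)
  | none => (none, content)

-- ===== PRECONDITION & SPEC =====
def Spec_extract_h1 (content : String) (out : Option String × String) : Prop := out = extract_h1_alt content
instance (content : String) (out : Option String × String) : Decidable (Spec_extract_h1 content out) := by unfold Spec_extract_h1; infer_instance

-- ===== CLAIM (what is proved, stated in full; the proofs are below) =====
def Claim_equal_extract_h1 : Prop := ∀ (content : String), Dom_extract_h1 content → Spec_extract_h1 content (extract_h1 content)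

-- ===== LEMMAS AND PROOFS =====

-- Reference form of split("\n"): structural recursion on the characters.
def refSplit : List Char → List (List Char)
  | [] => [[]]
  | c :: rest =>
    if c = '\n' then [] :: refSplit rest
    else
      match refSplit rest with
      | [] => [[c]]
      | h :: t => (c :: h) :: t

theorem refSplit_ne_nil (s : List Char) : refSplit s ≠ [] := by
  cases s with
  | nil => simp [refSplit]
  | cons c rest =>
    simp only [refSplit]
    split <;> try simp
    split <;> simp

theorem splitOn_go_spec (l : List Char) : ∀ (fuel : Nat) (cur : List Char)
    (acc : List (List Char)) (h : List Char) (t : List (List Char)),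
    l.length < fuel → refSplit l = (h :: t) →
    PySem.Chars.splitOn.go ['\n'] fuel l cur acc = acc.reverse ++ (cur.reverse ++ h) :: t := by
  induction l with
  | nil =>
    intro fuel cur acc h t hf hr
    obtain ⟨f, rfl⟩ : ∃ f, fuel = f + 1 := ⟨fuel - 1, by omega⟩
    simp [refSplit] at hr
    obtain ⟨rfl, rfl⟩ := hr
    simp [PySem.Chars.splitOn.go]
  | cons c rest ih =>
    intro fuel cur acc h t hf hr
    obtain ⟨f, rfl⟩ : ∃ f, fuel = f + 1 := ⟨fuel - 1, by omega⟩
    obtain ⟨h', t', hrest⟩ : ∃ h' t', refSplit rest = h' :: t' := by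
      cases hx : refSplit rest with
      | nil => exact absurd hx (refSplit_ne_nil rest)
      | cons a b => exact ⟨a, b, rfl⟩
    have hflt : rest.length < f := by simp at hf; omega
    by_cases hc : c = '\n'
    · subst hc
      simp [refSplit, hrest] at hr
      obtain ⟨rfl, rfl⟩ := hr
      have := ih f [] (cur.reverse :: acc) h' t' hflt hrest
      simp [PySem.Chars.splitOn.go, List.isPrefixOf] at this ⊢
      simp [this]
    · simp [refSplit, hc, hrest] at hr
      obtain ⟨rfl, rfl⟩ := hr
      have := ih f (c :: cur) acc h' t' hflt hrest
      simp [PySem.Chars.splitOn.go, List.isPrefixOf, Ne.symm hc] at this ⊢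
      simp [this]

theorem splitOn_eq_refSplit (s : List Char) :
    PySem.Chars.splitOn s ['\n'] = refSplit s := by
  obtain ⟨h, t, hs⟩ : ∃ h t, refSplit s = h :: t := by
    cases hx : refSplit s with
    | nil => exact absurd hx (refSplit_ne_nil s)
    | cons a b => exact ⟨a, b, rfl⟩
  rw [PySem.Chars.splitOn, splitOn_go_spec s (s.length + 1) [] [] h t (by omega) hs, hs]
  simp

theorem intercalate_cons_cons (sep : List Char) (c : Char) (h : List Char)
    (t : List (List Char)) :
    sep.intercalate ((c :: h) :: t) = c :: sep.intercalate (h :: t) := by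
  cases t <;> simp [List.intercalate]

theorem intercalate_nil_cons (sep h : List Char) (t : List (List Char)) :
    sep.intercalate ([] :: h :: t) = sep ++ sep.intercalate (h :: t) := by
  simp [List.intercalate]

theorem join_refSplit (s : List Char) :
    PySem.Chars.join ['\n'] (refSplit s) = s := by
  induction s with
  | nil => simp [refSplit, PySem.Chars.join, List.intercalate]
  | cons c rest ih =>
    obtain ⟨h', t', hrest⟩ : ∃ h' t', refSplit rest = h' :: t' := by
      cases hx : refSplit rest with
      | nil => exact absurd hx (refSplit_ne_nil rest)
      | cons a b => exact ⟨a, b, rfl⟩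
    rw [hrest] at ih
    simp only [PySem.Chars.join] at ih ⊢
    by_cases hc : c = '\n'
    · subst hc
      have e1 : refSplit ('\n' :: rest) = [] :: h' :: t' := by simp [refSplit, hrest]
      rw [e1, intercalate_nil_cons, ih]
      rfl
    · have e2 : refSplit (c :: rest) = (c :: h') :: t' := by simp [refSplit, hc, hrest]
      rw [e2, intercalate_cons_cons, ih]

theorem refSplit_char (s : List Char) :
    refSplit s = s.takeWhile (fun c => c ≠ '\n') ::
      (match s.dropWhile (fun c => c ≠ '\n') with
       | [] => []
       | _ :: rest => refSplit rest) := by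
  induction s with
  | nil => simp [refSplit]
  | cons c rest ih =>
    by_cases hc : c = '\n'
    · subst hc
      simp [refSplit]
    · simp only [refSplit, if_neg hc, List.takeWhile_cons, List.dropWhile_cons, ih]
      simp [hc]

theorem loop_eq (s : List Char) :
    extract_h1_loop (refSplit s) = extract_h1_alt_loop s := by
  fun_induction extract_h1_alt_loop s with
  | case1 s hsw =>
    rw [refSplit_char s]
    simp only [extract_h1_loop]
    rw [if_pos hsw]
    cases hd : s.dropWhile (fun c => c ≠ '\n') with
    | nil => simp [PySem.Chars.join, List.intercalate]
    | cons d r => simp [join_refSplit]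
  | case2 s hsw hd =>
    rw [refSplit_char s]
    simp only [extract_h1_loop]
    rw [if_neg hsw, hd]
    simp [extract_h1_loop]
  | case3 s hsw d r hd ih =>
    rw [refSplit_char s]
    simp only [extract_h1_loop]
    rw [if_neg hsw, hd]
    exact ih

-- ===== VERDICT (by name: the statement is the Claim_ definition above) =====
theorem extract_h1_spec : Claim_equal_extract_h1 := by
  intro content _
  unfold Spec_extract_h1 extract_h1 extract_h1_alt
  rw [splitOn_eq_refSplit, loop_eq]
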